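-- pv_equiv track=rewrite | github.com/markusstraub/radlkarte | public/data/minify_and_sort_geojson.py | get_features_with_duplicate_or_invalid_ids
-- ===== SOURCE A (Python) =====
-- def get_features_with_duplicate_or_invalid_ids(features):
--     seen_ids = set()
--     bad_features = []
--     for feature in features:
--         id = feature['properties']['id']
--         if id in seen_ids or id < 0:
--             bad_features.append(feature)
--         seen_ids.add(id)
--     return bad_features
-- ===== SOURCE B (Python) =====
-- def get_features_with_duplicate_or_invalid_ids(features):
--     first_seen = {}
--     for i, feature in enumerate(features):
--         first_seen.setdefault(feature['properties']['id'], i)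
--     return [feature for i, feature in enumerate(features)
--             if feature['properties']['id'] < 0
--             or first_seen[feature['properties']['id']] != i]
-- ===== Notes on version B (the rewrite author's own statement) =====
-- stated objective: alternative
-- what changed: Replaces A's single pass with a running seen-set by two passes: a first-occurrence index table built once with dict.setdefault over enumerate, then an enumerate-and-filter pass that flags a feature when its id is negative or its index differs from the recorded first occurrence.
import Mathlib
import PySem

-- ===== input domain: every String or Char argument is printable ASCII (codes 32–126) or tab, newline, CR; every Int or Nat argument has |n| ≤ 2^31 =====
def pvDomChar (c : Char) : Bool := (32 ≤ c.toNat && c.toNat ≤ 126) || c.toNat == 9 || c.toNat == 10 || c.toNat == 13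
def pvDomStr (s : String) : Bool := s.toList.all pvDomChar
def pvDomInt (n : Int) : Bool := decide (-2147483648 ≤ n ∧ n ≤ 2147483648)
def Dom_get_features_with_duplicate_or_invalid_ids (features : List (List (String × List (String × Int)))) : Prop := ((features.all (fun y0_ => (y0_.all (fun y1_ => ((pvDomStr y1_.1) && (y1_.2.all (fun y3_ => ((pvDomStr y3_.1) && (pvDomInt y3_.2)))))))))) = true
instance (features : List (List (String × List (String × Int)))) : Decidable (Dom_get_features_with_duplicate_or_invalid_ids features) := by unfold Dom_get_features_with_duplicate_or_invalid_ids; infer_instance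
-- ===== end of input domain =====

-- B replaces A's single pass with a running seen-set by two passes: a first-occurrence
-- index table built once, then an enumerate-and-filter pass (objective: alternative
-- decomposition, same O(n) cost). Return value only; neither version mutates its input.

-- ===== PORT A =====
-- shared helper: feature['properties']['id'] (both Pythons evaluate exactly this
-- expression; under Pre_ both lookups succeed, so the .getD 0 default is never used)
def pvGetId (f : List (String × List (String × Int))) : Int :=
  (((f.lookup "properties").bind (fun p => p.lookup "id")).getD 0)

def get_features_with_duplicate_or_invalid_ids (features : List (List (String × List (String × Int)))) : List (List (String × List (String × Int))) :=
  (features.foldl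
    (fun st feature =>
      (PySem.Set.add st.1 (pvGetId feature),
       if PySem.Set.contains st.1 (pvGetId feature) || decide (pvGetId feature < 0)
       then st.2 ++ [feature] else st.2))
    ((PySem.Set.empty : PySem.Set Int), [])).2

-- ===== PORT B =====
-- first loop of Source B: first_seen.setdefault(id, i) over enumerate(features)
def pvFirstSeen (features : List (List (String × List (String × Int)))) : PySem.Dict Int Int :=
  (PySem.List.enumerate features).foldl
    (fun d p => PySem.Dict.setdefault d (pvGetId p.2) p.1) PySem.Dict.empty

-- second pass of Source B; first_seen[id] always succeeds (id was inserted in the first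
-- pass), so getD _ 0 is exact there
def get_features_with_duplicate_or_invalid_ids_alt (features : List (List (String × List (String × Int)))) : List (List (String × List (String × Int))) :=
  let first := pvFirstSeen features
  ((PySem.List.enumerate features).filter
    (fun p => decide (pvGetId p.2 < 0) || !(PySem.Dict.getD first (pvGetId p.2) 0 == p.1))).map (·.2)

-- ===== PRECONDITION & SPEC =====
-- Pre_ excludes exactly the features on which feature['properties']['id'] raises a
-- KeyError in both Pythons (missing 'properties' or 'id' key).
def Pre_get_features_with_duplicate_or_invalid_ids (features : List (List (String × List (String × Int)))) : Prop :=
  ∀ f ∈ features, ((f.lookup "properties").bind (fun p => p.lookup "id")).isSome = true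
instance (features : List (List (String × List (String × Int)))) : Decidable (Pre_get_features_with_duplicate_or_invalid_ids features) := by unfold Pre_get_features_with_duplicate_or_invalid_ids; infer_instance
def pvWitness_get_features_with_duplicate_or_invalid_ids : (List (List (String × List (String × Int)))) :=
  ([[("properties", [("id", 7)])], [("properties", [("id", -1)])], [("properties", [("id", 7)])]])

def Spec_get_features_with_duplicate_or_invalid_ids (features : List (List (String × List (String × Int)))) (out : List (List (String × List (String × Int)))) : Prop := out = get_features_with_duplicate_or_invalid_ids_alt features
instance (features : List (List (String × List (String × Int)))) (out : List (List (String × List (String × Int)))) : Decidable (Spec_get_features_with_duplicate_or_invalid_ids features out) := by unfold Spec_get_features_with_duplicate_or_invalid_ids; infer_instance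

-- ===== CLAIM (what is proved, stated in full; the proofs are below) =====
def Claim_equal_get_features_with_duplicate_or_invalid_ids : Prop := ∀ (features : List (List (String × List (String × Int)))), Dom_get_features_with_duplicate_or_invalid_ids features → Pre_get_features_with_duplicate_or_invalid_ids features → Spec_get_features_with_duplicate_or_invalid_ids features (get_features_with_duplicate_or_invalid_ids features)

-- ===== LEMMAS AND PROOFS =====

-- index (with start offset s) of the first occurrence of id, as the setdefault pass records it
def pvFirstIdx : List Int → Int → Int → Option Int
  | [], _, _ => none
  | a :: t, s, id => if a = id then some s else pvFirstIdx t (s + 1) id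

-- Dict.setdefault unfolded to an if (specific to this file's use of it)
theorem pv_setdefault_eq (d : PySem.Dict Int Int) (k v : Int) :
    PySem.Dict.setdefault d k v = if d.contains k then d else d.insert k v := by
  by_cases h : d.contains k = true
  · simp [PySem.Dict.setdefault, h]
  · simp only [PySem.Dict.setdefault, h, if_false, Bool.false_eq_true]
    have hi := PySem.Dict.items_insert_of_not_contains (d := d) (k := k) (v := v)
      (by simpa using h)
    cases hd : d.insert k v with
    | mk items => simp_all

-- get? after B's first pass = the first-occurrence index, offset by the enumerate start
theorem pv_fs_get? (xs : List (List (String × List (String × Int)))) :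
    ∀ (s : Int) (d : PySem.Dict Int Int) (id : Int),
    ((PySem.List.enumerate xs s).foldl (fun d p => PySem.Dict.setdefault d (pvGetId p.2) p.1) d).get? id
      = (d.get? id).or (pvFirstIdx (xs.map pvGetId) s id) := by
  induction xs with
  | nil => intro s d id; simp [PySem.List.enumerate_nil, pvFirstIdx]
  | cons x xs ih =>
    intro s d id
    rw [PySem.List.enumerate_cons, List.foldl_cons, ih]
    simp only [List.map_cons, pvFirstIdx]
    by_cases hid : pvGetId x = id
    · subst hid
      rw [pv_setdefault_eq]
      by_cases hc : d.contains (pvGetId x) = true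
      · obtain ⟨v, hv⟩ : ∃ v, d.get? (pvGetId x) = some v := by
          cases hq : d.get? (pvGetId x) with
          | none => rw [PySem.Dict.get?_eq_none_iff_contains] at hq; simp [hq] at hc
          | some v => exact ⟨v, rfl⟩
        simp [hc, hv, Option.some_or]
      · have hn : d.get? (pvGetId x) = none := by
          rw [PySem.Dict.get?_eq_none_iff_contains]; simpa using hc
        simp [hc, hn, PySem.Dict.get?_insert_self, Option.some_or]
    · rw [pv_setdefault_eq]
      have hget : (if d.contains (pvGetId x) then d else d.insert (pvGetId x) s).get? id
          = d.get? id := by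
        split
        · rfl
        · exact PySem.Dict.get?_insert_of_ne d s (fun h => hid h.symm)
      rw [hget, if_neg hid]

-- the first-occurrence index of id in A ++ id :: B when id is not in the prefix A
theorem pv_fi_of_not_mem (B : List Int) (id : Int) :
    ∀ (A : List Int) (s : Int), id ∉ A → pvFirstIdx (A ++ id :: B) s id = some (s + A.length) := by
  intro A
  induction A with
  | nil => intro s _; simp [pvFirstIdx]
  | cons a A ih =>
    intro s hm
    have ha : ¬ a = id := fun h => hm (by simp [h])
    have := ih (s + 1) (fun h => hm (by simp [h]))
    simp only [List.cons_append, pvFirstIdx, ha, if_false]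
    rw [this]
    congr 1
    simp only [List.length_cons]
    push_cast
    ring

-- … and when id is in the prefix A: some index strictly below A's length
theorem pv_fi_of_mem (B : List Int) (id : Int) :
    ∀ (A : List Int) (s : Int), id ∈ A →
      ∃ j : Nat, j < A.length ∧ pvFirstIdx (A ++ id :: B) s id = some (s + j) := by
  intro A
  induction A with
  | nil => intro s h; simp at h
  | cons a A ih =>
    intro s hm
    by_cases ha : a = id
    · exact ⟨0, by simp, by simp [pvFirstIdx, ha]⟩
    · have hm' : id ∈ A := by rcases List.mem_cons.mp hm with h | h; exact absurd h.symm ha; exact h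
      obtain ⟨j, hj, hfi⟩ := ih (s + 1) hm'
      refine ⟨j + 1, by simpa using Nat.succ_lt_succ hj, ?_⟩
      simp only [List.cons_append, pvFirstIdx, ha, if_false]
      rw [hfi]
      congr 1
      simp only [Nat.cast_add, Nat.cast_one]
      ring

-- main invariant: A's fold over a suffix, seeded with the ids of the prefix,
-- produces exactly B's filtered enumeration of that suffix
theorem pv_main (features : List (List (String × List (String × Int)))) :
    ∀ (suf pre acc : List (List (String × List (String × Int)))), features = pre ++ suf →
    (suf.foldl
      (fun st f =>
        (PySem.Set.add st.1 (pvGetId f),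
         if PySem.Set.contains st.1 (pvGetId f) || decide (pvGetId f < 0)
         then st.2 ++ [f] else st.2))
      ((PySem.Set.ofList (pre.map pvGetId) : PySem.Set Int), acc)).2
    = acc ++ ((PySem.List.enumerate suf (pre.length : Int)).filter
        (fun p => decide (pvGetId p.2 < 0) || !(PySem.Dict.getD (pvFirstSeen features) (pvGetId p.2) 0 == p.1))).map (·.2) := by
  intro suf
  induction suf with
  | nil => intro pre acc h; simp [PySem.List.enumerate_nil]
  | cons x suf ih =>
    intro pre acc h
    have hget : (pvFirstSeen features).get? (pvGetId x)
        = pvFirstIdx (pre.map pvGetId ++ pvGetId x :: suf.map pvGetId) 0 (pvGetId x) := by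
      unfold pvFirstSeen
      rw [pv_fs_get? features 0 PySem.Dict.empty (pvGetId x)]
      rw [PySem.Dict.get?_empty, Option.none_or, h, List.map_append, List.map_cons]
    have hcond : (PySem.Set.contains (PySem.Set.ofList (pre.map pvGetId)) (pvGetId x) || decide (pvGetId x < 0))
        = (decide (pvGetId x < 0) || !(PySem.Dict.getD (pvFirstSeen features) (pvGetId x) 0 == ((pre.length : Int)))) := by
      by_cases hm : pvGetId x ∈ pre.map pvGetId
      · obtain ⟨j, hj, hfi⟩ := pv_fi_of_mem (suf.map pvGetId) (pvGetId x) (pre.map pvGetId) 0 hm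
        have hgd : PySem.Dict.getD (pvFirstSeen features) (pvGetId x) 0 = (j : Int) := by
          rw [PySem.Dict.getD_eq_get?_getD, hget, hfi]
          simp
        have hjj : j < pre.length := by simpa using hj
        have hne : ((j : Int)) ≠ ((pre.length : Int)) := by exact_mod_cast Nat.ne_of_lt hjj
        have hcontains : PySem.Set.contains (PySem.Set.ofList (pre.map pvGetId)) (pvGetId x) = true := by
          rw [PySem.Set.contains_iff, PySem.Set.mem_ofList]; exact hm
        have hbeq : (((j : Int)) == ((pre.length : Int))) = false := by simpa using hne
        rw [hcontains, hgd, hbeq]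
        simp
      · have hfi := pv_fi_of_not_mem (suf.map pvGetId) (pvGetId x) (pre.map pvGetId) 0 hm
        have hgd : PySem.Dict.getD (pvFirstSeen features) (pvGetId x) 0 = ((pre.length : Int)) := by
          rw [PySem.Dict.getD_eq_get?_getD, hget, hfi]
          simp
        have hcontains : PySem.Set.contains (PySem.Set.ofList (pre.map pvGetId)) (pvGetId x) = false := by
          rw [Bool.eq_false_iff]
          intro hc
          rw [PySem.Set.contains_iff, PySem.Set.mem_ofList] at hc
          exact hm hc
        rw [hcontains, hgd]
        simp
    have h' : features = (pre ++ [x]) ++ suf := by simpa [List.append_assoc] using h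
    have hset : PySem.Set.add (PySem.Set.ofList (pre.map pvGetId)) (pvGetId x)
        = (PySem.Set.ofList ((pre ++ [x]).map pvGetId) : PySem.Set Int) := by
      rw [List.map_append, List.map_cons, List.map_nil, PySem.Set.ofList_append_singleton]
    have hlen : (((pre ++ [x]).length : Int)) = ((pre.length : Int)) + 1 := by
      simp
    rw [List.foldl_cons, PySem.List.enumerate_cons, List.filter_cons]
    dsimp only
    rw [hcond, hset]
    by_cases hb : (decide (pvGetId x < 0) || !(PySem.Dict.getD (pvFirstSeen features) (pvGetId x) 0 == ((pre.length : Int)))) = true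
    · rw [if_pos hb, if_pos hb, List.map_cons]
      have hih := ih (pre ++ [x]) (acc ++ [x]) h'
      rw [hlen] at hih
      rw [hih]
      simp
    · rw [if_neg hb, if_neg hb]
      have hih := ih (pre ++ [x]) acc h'
      rw [hlen] at hih
      exact hih

-- ===== VERDICT (by name: the statement is the Claim_ definition above) =====
theorem get_features_with_duplicate_or_invalid_ids_spec : Claim_equal_get_features_with_duplicate_or_invalid_ids := by
  intro features _ _
  unfold Spec_get_features_with_duplicate_or_invalid_ids
  unfold get_features_with_duplicate_or_invalid_ids get_features_with_duplicate_or_invalid_ids_alt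
  have := pv_main features features [] [] rfl
  simpa using this
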